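-- pv_equiv track=rewrite | github.com/ivansuli/Scrabble | ScrabbleV7.py | palabracolumna
-- ===== SOURCE A (Python) =====
-- def palabracolumna(f, c, Tab, lispos, let, lispal):
--     y=c
--     pala=let
--     x=f
--     while str(x-1)+","+str(y) in lispos:
--         pala=Tab[x-2][y-1]+pala
--         x=x-1
--     x=f
--     while str(x+1)+","+str(y) in lispos:
--             pala=pala+Tab[x][y-1]
--             x=x+1
--     lispal.append(pala)
--     return lispal
-- ===== SOURCE B (Python) =====
-- def palabracolumna(f, c, Tab, lispos, let, lispal):
--     # Scan boundaries first (membership only), then assemble the word in one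
--     # top-to-bottom pass.  Mutates lispal via append, like the original.
--     top = f
--     while str(top - 1) + "," + str(c) in lispos:
--         top -= 1
--     bot = f
--     while str(bot + 1) + "," + str(c) in lispos:
--         bot += 1
--     word = ""
--     for r in range(top, bot + 1):
--         word += let if r == f else Tab[r - 1][c - 1]
--     lispal.append(word)
--     return lispal
-- ===== Notes on version B (the rewrite author's own statement) =====
-- stated objective: alternative
-- what changed: Instead of building the word while scanning (prepend in the up loop, append in the down loop), B first scans membership only to find the top and bottom boundary rows and then assembles the word in a single top-to-bottom pass over range(top, bot+1).
import Mathlib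
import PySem

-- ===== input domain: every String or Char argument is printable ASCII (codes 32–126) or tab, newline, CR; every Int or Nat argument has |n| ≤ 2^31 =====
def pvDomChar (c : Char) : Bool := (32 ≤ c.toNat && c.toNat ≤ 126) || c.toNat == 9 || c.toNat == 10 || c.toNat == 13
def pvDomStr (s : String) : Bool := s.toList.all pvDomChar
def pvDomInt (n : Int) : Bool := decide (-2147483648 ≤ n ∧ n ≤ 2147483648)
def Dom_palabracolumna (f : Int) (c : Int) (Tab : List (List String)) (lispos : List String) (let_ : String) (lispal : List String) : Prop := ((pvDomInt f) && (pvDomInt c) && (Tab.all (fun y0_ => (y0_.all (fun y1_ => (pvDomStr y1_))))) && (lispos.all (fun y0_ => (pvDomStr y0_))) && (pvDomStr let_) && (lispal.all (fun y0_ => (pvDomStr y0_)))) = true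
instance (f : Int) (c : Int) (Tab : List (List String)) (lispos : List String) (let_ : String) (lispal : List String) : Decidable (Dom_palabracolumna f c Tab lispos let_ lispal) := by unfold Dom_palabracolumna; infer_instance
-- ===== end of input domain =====

-- B first finds the top/bottom boundary rows by membership scans and then builds the
-- word in one top-to-bottom pass, instead of A's interleaved prepend/append building.
-- Both A and B mutate lispal (append); the equivalence is about the returned list.

-- ===== PORT A =====
-- str(x) + "," + str(y)
def pvKey (x y : Int) : String := PySem.Int.toStr x ++ "," ++ PySem.Int.toStr y

-- Tab[i][y-1]; the defaults are reached only where Python raises (excluded by Pre_)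
def pvAcell (Tab : List (List String)) (y i : Int) : String :=
  (PySem.List.pyGet? ((PySem.List.pyGet? Tab i).getD []) (y - 1)).getD ""

-- first while loop of A; fuel lispos.length+1 suffices: each successful test consumes
-- a distinct key of lispos, so the Python loop makes at most lispos.length iterations
def pvUpA (Tab : List (List String)) (lispos : List String) (y : Int) : Nat → Int → String → String
  | 0, _, pala => pala
  | n+1, x, pala =>
    if pvKey (x - 1) y ∈ lispos then pvUpA Tab lispos y n (x - 1) (pvAcell Tab y (x - 2) ++ pala)
    else pala

-- second while loop of A
def pvDownA (Tab : List (List String)) (lispos : List String) (y : Int) : Nat → Int → String → String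
  | 0, _, pala => pala
  | n+1, x, pala =>
    if pvKey (x + 1) y ∈ lispos then pvDownA Tab lispos y n (x + 1) (pala ++ pvAcell Tab y x)
    else pala

def palabracolumna (f : Int) (c : Int) (Tab : List (List String)) (lispos : List String) (let_ : String) (lispal : List String) : List String :=
  let y := c
  let pala := pvUpA Tab lispos y (lispos.length + 1) f let_
  let pala := pvDownA Tab lispos y (lispos.length + 1) f pala
  lispal ++ [pala]

-- ===== PORT B =====
-- top boundary scan (membership only); same fuel bound as A's loops
def pvTopB (lispos : List String) (c : Int) : Nat → Int → Int
  | 0, top => top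
  | n+1, top => if pvKey (top - 1) c ∈ lispos then pvTopB lispos c n (top - 1) else top

def pvBotB (lispos : List String) (c : Int) : Nat → Int → Int
  | 0, bot => bot
  | n+1, bot => if pvKey (bot + 1) c ∈ lispos then pvBotB lispos c n (bot + 1) else bot

def palabracolumna_alt (f : Int) (c : Int) (Tab : List (List String)) (lispos : List String) (let_ : String) (lispal : List String) : List String :=
  let top := pvTopB lispos c (lispos.length + 1) f
  let bot := pvBotB lispos c (lispos.length + 1) f
  let word := (PySem.List.pyRange top (bot + 1) 1).foldl
    (fun w r => w ++ (if r = f then let_ else (PySem.List.pyGet? ((PySem.List.pyGet? Tab (r - 1)).getD []) (c - 1)).getD "")) ""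
  lispal ++ [word]

-- ===== PRECONDITION & SPEC =====
-- Pre_ excludes exactly the inputs where Python A raises an IndexError: some loop
-- iteration that is actually reached (its membership chain holds) accesses a cell
-- outside the board (after Python's negative-index wraparound).
def Pre_palabracolumna (f : Int) (c : Int) (Tab : List (List String)) (lispos : List String) (let_ : String) (lispal : List String) : Prop :=
  (∀ j ∈ List.range lispos.length,
      (∀ i ∈ List.range (j + 1), pvKey (f - 1 - (i : Int)) c ∈ lispos) →
      ((PySem.List.pyGet? Tab (f - 2 - (j : Int))).bind
        (fun row => PySem.List.pyGet? row (c - 1))).isSome = true)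
  ∧ (∀ j ∈ List.range lispos.length,
      (∀ i ∈ List.range (j + 1), pvKey (f + 1 + (i : Int)) c ∈ lispos) →
      ((PySem.List.pyGet? Tab (f + (j : Int))).bind
        (fun row => PySem.List.pyGet? row (c - 1))).isSome = true)

instance (f : Int) (c : Int) (Tab : List (List String)) (lispos : List String) (let_ : String) (lispal : List String) : Decidable (Pre_palabracolumna f c Tab lispos let_ lispal) := by unfold Pre_palabracolumna; infer_instance

def pvWitness_palabracolumna : Int × Int × List (List String) × List String × String × List String :=
  (2, 1, [["A"], ["B"], ["C"]], [], "x", ["q"])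

def Spec_palabracolumna (f : Int) (c : Int) (Tab : List (List String)) (lispos : List String) (let_ : String) (lispal : List String) (out : List String) : Prop := out = palabracolumna_alt f c Tab lispos let_ lispal
instance (f : Int) (c : Int) (Tab : List (List String)) (lispos : List String) (let_ : String) (lispal : List String) (out : List String) : Decidable (Spec_palabracolumna f c Tab lispos let_ lispal out) := by unfold Spec_palabracolumna; infer_instance

-- ===== CLAIM (what is proved, stated in full; the proofs are below) =====
def Claim_equal_palabracolumna : Prop := ∀ (f : Int) (c : Int) (Tab : List (List String)) (lispos : List String) (let_ : String) (lispal : List String), Dom_palabracolumna f c Tab lispos let_ lispal → Pre_palabracolumna f c Tab lispos let_ lispal → Spec_palabracolumna f c Tab lispos let_ lispal (palabracolumna f c Tab lispos let_ lispal)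

-- ===== LEMMAS AND PROOFS =====

-- concatenation of g over a list of row indices
def pvCat (g : Int → String) : List Int → String
  | [] => ""
  | r :: rs => g r ++ pvCat g rs

theorem pvCat_append (g : Int → String) (l1 l2 : List Int) :
    pvCat g (l1 ++ l2) = pvCat g l1 ++ pvCat g l2 := by
  induction l1 with
  | nil => simp [pvCat]
  | cons r rs ih => simp [pvCat, ih, String.append_assoc]

theorem pvCat_congr (g h : Int → String) (l : List Int) (hgh : ∀ r ∈ l, g r = h r) :
    pvCat g l = pvCat h l := by
  induction l with
  | nil => rfl
  | cons r rs ih =>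
    simp [pvCat, hgh r (by simp), ih (fun r hr => hgh r (by simp [hr]))]

theorem foldl_eq_pvCat (g : Int → String) (l : List Int) :
    ∀ init : String, l.foldl (fun w r => w ++ g r) init = init ++ pvCat g l := by
  induction l with
  | nil => intro init; simp [pvCat]
  | cons r rs ih => intro init; simp [pvCat, List.foldl, ih, String.append_assoc]

theorem pvTopB_le (lispos : List String) (c : Int) :
    ∀ (n : Nat) (x : Int), pvTopB lispos c n x ≤ x := by
  intro n
  induction n with
  | zero => intro x; simp [pvTopB]
  | succ n ih =>
    intro x
    simp only [pvTopB]
    split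
    · exact le_trans (ih (x - 1)) (by omega)
    · exact le_refl x

theorem pvBotB_ge (lispos : List String) (c : Int) :
    ∀ (n : Nat) (x : Int), x ≤ pvBotB lispos c n x := by
  intro n
  induction n with
  | zero => intro x; simp [pvBotB]
  | succ n ih =>
    intro x
    simp only [pvBotB]
    split
    · exact le_trans (by omega) (ih (x + 1))
    · exact le_refl x

theorem pvUpA_eq (Tab : List (List String)) (lispos : List String) (y : Int) :
    ∀ (n : Nat) (x : Int) (pala : String),
      pvUpA Tab lispos y n x pala =
        pvCat (fun r => pvAcell Tab y (r - 1)) (PySem.List.pyRange (pvTopB lispos y n x) x 1) ++ pala := by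
  intro n
  induction n with
  | zero =>
    intro x pala
    simp [pvUpA, pvTopB, PySem.List.pyRange_one_eq_nil (le_refl x), pvCat]
  | succ n ih =>
    intro x pala
    simp only [pvUpA, pvTopB]
    split
    · have hle : pvTopB lispos y n (x - 1) ≤ x - 1 := pvTopB_le lispos y n (x - 1)
      have hsplit : PySem.List.pyRange (pvTopB lispos y n (x - 1)) x 1 =
          PySem.List.pyRange (pvTopB lispos y n (x - 1)) (x - 1) 1 ++ [x - 1] := by
        have h := PySem.List.pyRange_one_succ_right hle
        simpa using h
      rw [ih, hsplit]
      have hx : (x - 1) - 1 = x - 2 := by omega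
      simp [pvCat_append, pvCat, String.append_assoc, hx]
    · simp [PySem.List.pyRange_one_eq_nil (le_refl x), pvCat]

theorem pvDownA_eq (Tab : List (List String)) (lispos : List String) (y : Int) :
    ∀ (n : Nat) (x : Int) (pala : String),
      pvDownA Tab lispos y n x pala =
        pala ++ pvCat (fun r => pvAcell Tab y (r - 1)) (PySem.List.pyRange (x + 1) (pvBotB lispos y n x + 1) 1) := by
  intro n
  induction n with
  | zero =>
    intro x pala
    simp [pvDownA, pvBotB, PySem.List.pyRange_one_eq_nil (le_refl (x + 1)), pvCat]
  | succ n ih =>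
    intro x pala
    simp only [pvDownA, pvBotB]
    split
    · rw [ih, PySem.List.pyRange_one_cons (by
        have := pvBotB_ge lispos y n (x + 1); omega : x + 1 < pvBotB lispos y n (x + 1) + 1)]
      have : (x + 1) - 1 = x := by omega
      simp [pvCat, String.append_assoc, this]
    · simp [PySem.List.pyRange_one_eq_nil (le_refl (x + 1)), pvCat]

-- ===== VERDICT (by name: the statement is the Claim_ definition above) =====
theorem palabracolumna_spec : Claim_equal_palabracolumna := by
  intro f c Tab lispos let_ lispal _ _
  unfold Spec_palabracolumna palabracolumna palabracolumna_alt
  dsimp only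
  set n := lispos.length + 1 with hn
  set cell : Int → String := fun r => pvAcell Tab c (r - 1) with hcell
  set g : Int → String :=
    fun r => if r = f then let_ else (PySem.List.pyGet? ((PySem.List.pyGet? Tab (r - 1)).getD []) (c - 1)).getD "" with hg
  set top := pvTopB lispos c n f with htop
  set bot := pvBotB lispos c n f with hbot
  have htle : top ≤ f := pvTopB_le lispos c n f
  have hbge : f ≤ bot := pvBotB_ge lispos c n f
  rw [pvUpA_eq, pvDownA_eq, foldl_eq_pvCat]
  rw [PySem.List.pyRange_one_append top f (bot + 1) htle (by omega)]
  rw [PySem.List.pyRange_one_cons (show f < bot + 1 by omega)]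
  rw [pvCat_append]
  have h1 : pvCat g (PySem.List.pyRange top f 1) = pvCat cell (PySem.List.pyRange top f 1) := by
    apply pvCat_congr
    intro r hr
    have := (PySem.List.mem_pyRange_one).1 hr
    simp [hg, hcell, pvAcell, show r ≠ f by omega]
  have h2 : pvCat g (PySem.List.pyRange (f + 1) (bot + 1) 1) =
      pvCat cell (PySem.List.pyRange (f + 1) (bot + 1) 1) := by
    apply pvCat_congr
    intro r hr
    have := (PySem.List.mem_pyRange_one).1 hr
    simp [hg, hcell, pvAcell, show r ≠ f by omega]
  simp only [pvCat]
  rw [← hg, h1, h2]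
  simp [hcell, htop, hbot, String.append_assoc]
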